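-- pv_equiv track=rewrite | github.com/redpencilio/shmdoc-analyzer-service | analyze/hierarchical_analyzer.py | children_same_columns
-- ===== SOURCE A (Python) =====
-- def get_child_headers(child):
--     children = set()
--     if not isinstance(child, dict):
--         return children
--     for header in child:
--         children.add(header)
--     return children
--
-- def children_same_columns(data):
--     """
--     Check if all children in the dict have the same column headers
--     """
--     child_headers = []
--     for subcolumn in data:
--         headers = ()
--         if isinstance(data, dict):
--             headers = get_child_headers(data[subcolumn])
--         else:
--             headers = get_child_headers(subcolumn)
--
--         if len(headers) and headers in child_headers:
--             return True
--         child_headers.append(headers)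
--     return False
-- ===== SOURCE B (Python) =====
-- def children_same_columns(data):
--     """
--     Check if all children in the dict have the same column headers
--     """
--     children = data.values() if isinstance(data, dict) else data
--     canons = []
--     for child in children:
--         if isinstance(child, dict):
--             keys = sorted(child)
--             if keys:
--                 canons.append(keys)
--     canons = sorted(canons)
--     return any(canons[i] == canons[i + 1] for i in range(len(canons) - 1))
-- ===== Notes on version B (the rewrite author's own statement) =====
-- stated objective: faster
-- what changed: A scans the list of previously-seen header sets for a set-equal match inside the loop with an early return; B instead canonicalises each child's header set as its sorted key list, sorts the list of non-empty canons, and reports a duplicate iff two adjacent sorted canons are equal (sort-then-adjacent-scan instead of incremental membership scanning).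
import Mathlib
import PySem

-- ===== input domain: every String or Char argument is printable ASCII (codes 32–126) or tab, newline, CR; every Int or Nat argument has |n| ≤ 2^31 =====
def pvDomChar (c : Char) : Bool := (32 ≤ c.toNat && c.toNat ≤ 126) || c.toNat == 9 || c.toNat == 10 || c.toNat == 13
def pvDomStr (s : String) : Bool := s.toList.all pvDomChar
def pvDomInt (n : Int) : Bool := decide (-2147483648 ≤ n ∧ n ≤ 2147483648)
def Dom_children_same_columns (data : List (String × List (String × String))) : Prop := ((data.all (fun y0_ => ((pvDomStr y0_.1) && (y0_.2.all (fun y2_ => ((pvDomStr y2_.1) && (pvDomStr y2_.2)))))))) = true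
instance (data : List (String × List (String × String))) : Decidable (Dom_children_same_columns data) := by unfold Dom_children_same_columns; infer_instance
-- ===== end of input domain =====

-- B replaces A's per-child membership scan over the list of previously seen header sets (with an
-- early return) by a sort-then-adjacent-scan: each child's key set is canonicalised as its sorted
-- key list, the non-empty canons are sorted, and a duplicate exists iff two adjacent canons are equal.

-- ===== PORT A =====
-- get_child_headers: the child is always a dict here (List (String × String)), so the
-- isinstance branch is always taken; the loop adds each key to a set.
def getChildHeaders (child : List (String × String)) : PySem.Set String :=
  child.foldl (fun s kv => PySem.Set.add s kv.1) PySem.Set.empty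

-- the loop of children_same_columns: data is a dict, so 'headers = get_child_headers(data[subcolumn])'
def cscLoop (data : List (String × List (String × String))) :
    List (String × List (String × String)) → List (PySem.Set String) → Bool
  | [], _ => false
  | (k, _) :: rest, acc =>
    let headers := getChildHeaders ((PySem.Dict.mk data).getD k [])
    if (headers.length != 0) && acc.any (fun t => PySem.Set.equal t headers) then true
    else cscLoop data rest (acc ++ [headers])

def children_same_columns (data : List (String × List (String × String))) : Bool :=
  cscLoop data data []

-- ===== PORT B =====
-- 'sorted(child)' iterates the keys of the Python dict child — its DISTINCT keys — so it is
-- sorted over the deduplicated key list (exact: a Python dict holds each key once).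
def childCanon (child : List (String × String)) : List String :=
  PySem.List.sorted (PySem.List.dedup (child.map Prod.fst)) (fun x => x) false

-- any(canons[i] == canons[i+1] for i in range(len(canons)-1)): scan adjacent pairs
def hasAdjDup : List (List String) → Bool
  | a :: b :: t => a == b || hasAdjDup (b :: t)
  | _ => false

-- 'canons = sorted(canons)' (instances pinned to the lexicographic linear order on List String,
-- which is Python's tuple-of-strings comparison)
def sortCanons (canons : List (List String)) : List (List String) :=
  @PySem.List.sorted (List String) (List String) List.instLinearOrder.toLT
    List.instLinearOrder.toDecidableLT canons (fun x => x) false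

-- 'data.values()': data is a dict; under Pre_ (no duplicate keys) its values are data.map Prod.snd
def children_same_columns_alt (data : List (String × List (String × String))) : Bool :=
  hasAdjDup (sortCanons ((data.map Prod.snd).foldl
    (fun acc child =>
      let keys := childCanon child
      if !keys.isEmpty then acc ++ [keys] else acc) []))

-- ===== PRECONDITION & SPEC =====
-- Pre_ excludes association lists with duplicate keys: a Python dict cannot carry duplicate
-- keys, so such lists correspond to no input of the Python programs.
def Pre_children_same_columns (data : List (String × List (String × String))) : Prop :=
  (data.map Prod.fst).Nodup
instance (data : List (String × List (String × String))) : Decidable (Pre_children_same_columns data) := by unfold Pre_children_same_columns; infer_instance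

def pvWitness_children_same_columns : (List (String × List (String × String))) :=
  [("a", [("x", "1")]), ("b", [("x", "1")])]

def Spec_children_same_columns (data : List (String × List (String × String))) (out : Bool) : Prop := out = children_same_columns_alt data
instance (data : List (String × List (String × String))) (out : Bool) : Decidable (Spec_children_same_columns data out) := by unfold Spec_children_same_columns; infer_instance

-- ===== CLAIM (what is proved, stated in full; the proofs are below) =====
def Claim_equal_children_same_columns : Prop := ∀ (data : List (String × List (String × String))), Dom_children_same_columns data → Pre_children_same_columns data → Spec_children_same_columns data (children_same_columns data)

-- ===== LEMMAS AND PROOFS =====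

-- the fold in get_child_headers builds exactly set(keys)
theorem getChildHeaders_eq (child : List (String × String)) :
    getChildHeaders child = PySem.Set.ofList (child.map Prod.fst) := by
  rw [getChildHeaders, ← PySem.Set.update_nil_left, PySem.Set.update_map_eq_foldl_add]
  rfl

theorem set_equal_comm (s t : PySem.Set String) :
    PySem.Set.equal s t = PySem.Set.equal t s := by
  rw [Bool.eq_iff_iff]
  simp only [PySem.Set.equal_iff]
  constructor <;> intro h x <;> exact (h x).symm

theorem set_equal_ne_nil {s t : PySem.Set String} (h : PySem.Set.equal s t = true)
    (hs : s ≠ []) : t ≠ [] := by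
  rw [PySem.Set.equal_iff] at h
  match s, hs with
  | x :: s', _ =>
    intro ht
    have : x ∈ t := (h x).mp (by simp)
    simp [ht] at this

-- the collect loop of B, as filter-then-map of the canonicalised key sets
theorem canon_nonempty (s : PySem.Set String) :
    (!(PySem.List.sorted s (fun x => x) false).isEmpty) = (s.length != 0) := by
  have hlen : (PySem.List.sorted s (fun x => x) false).length = s.length := by
    simp [PySem.List.length_sorted]
  have h1 : (PySem.List.sorted s (fun x => x) false).isEmpty
      = decide ((PySem.List.sorted s (fun x => x) false).length = 0) := by
    cases PySem.List.sorted s (fun x => x) false <;> simp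
  rw [h1, hlen]
  cases s.length <;> simp

theorem collect_canons (xs : List (List (String × String))) :
    (xs.filter (fun c => !(childCanon c).isEmpty)).map childCanon
      = ((xs.map (fun c => PySem.Set.ofList (c.map Prod.fst))).filter
          (fun s => s.length != 0)).map
          (fun s => PySem.List.sorted s (fun x => x) false) := by
  induction xs with
  | nil => rfl
  | cons c t ih =>
    have hc : childCanon c
        = PySem.List.sorted (PySem.Set.ofList (c.map Prod.fst)) (fun x => x) false := by
      rw [childCanon]; simp
    simp only [List.map_cons, List.filter_cons, hc, canon_nonempty]
    by_cases hne : ((PySem.Set.ofList (c.map Prod.fst)).length != 0) = true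
    · rw [if_pos hne, if_pos hne, List.map_cons, List.map_cons, ih, hc]
    · rw [if_neg hne, if_neg hne, ih]

-- A's loop returns true iff the non-empty header sets seen so far plus those still to come
-- contain two set-equal members
theorem cscLoop_iff (data : List (String × List (String × String))) :
    ∀ (rest : List (String × List (String × String))) (acc : List (PySem.Set String)),
      (∀ p ∈ rest, (PySem.Dict.mk data).getD p.1 [] = p.2) →
      (acc.filter (fun s => s.length != 0)).Pairwise (fun a b => PySem.Set.equal a b = false) →
      (cscLoop data rest acc = true ↔
        ¬ ((acc.filter (fun s => s.length != 0)) ++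
            ((rest.map (fun kv => PySem.Set.ofList (kv.2.map Prod.fst))).filter
              (fun s => s.length != 0))).Pairwise
            (fun a b => PySem.Set.equal a b = false)) := by
  intro rest
  induction rest with
  | nil =>
    intro acc _ hacc
    simp [cscLoop, hacc]
  | cons p rest ih =>
    intro acc hlook hacc
    obtain ⟨k, v⟩ := p
    have hkv : (PySem.Dict.mk data).getD k [] = v := hlook (k, v) (by simp)
    rw [cscLoop]
    simp only [hkv, getChildHeaders_eq]
    set S := PySem.Set.ofList (v.map Prod.fst) with hS
    by_cases hne : (S.length != 0) = true
    · -- non-empty header set; the cons contributes S to the filtered list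
      have hsplit : ((((k, v) :: rest).map (fun kv => PySem.Set.ofList (kv.2.map Prod.fst))).filter
            (fun s => s.length != 0))
          = S :: ((rest.map (fun kv => PySem.Set.ofList (kv.2.map Prod.fst))).filter
            (fun s => s.length != 0)) := by
        simp only [List.map_cons, List.filter_cons, ← hS]
        rw [if_pos hne]
      rw [hsplit]
      by_cases hmem : acc.any (fun t => PySem.Set.equal t S) = true
      · have hcondT : ((S.length != 0) && acc.any (fun t => PySem.Set.equal t S)) = true := by
          rw [hne, hmem]; rfl
        rw [if_pos hcondT]
        obtain ⟨t, htacc, hteq⟩ := List.any_eq_true.mp hmem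
        constructor
        · intro _ hpw
          have hSnil : S ≠ [] := by
            intro hn; rw [hn] at hne; simp at hne
          have htnil : t ≠ [] := set_equal_ne_nil (by rw [set_equal_comm]; exact hteq) hSnil
          have htf : t ∈ acc.filter (fun s => s.length != 0) := by
            refine List.mem_filter.mpr ⟨htacc, ?_⟩
            simpa using fun h0 => htnil (List.length_eq_zero_iff.mp h0)
          rcases List.pairwise_append.mp hpw with ⟨_, _, hrel⟩
          have := hrel t htf S (List.mem_cons_self ..)
          rw [this] at hteq
          exact Bool.false_ne_true hteq
        · intro _; rfl
      · have hmemf : acc.any (fun t => PySem.Set.equal t S) = false :=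
          Bool.eq_false_iff.mpr hmem
        have hcond : ((S.length != 0) && acc.any (fun t => PySem.Set.equal t S)) = false := by
          rw [hmemf, Bool.and_false]
        rw [hcond, if_neg (by simp)]
        have hfacc' : (acc ++ [S]).filter (fun s => s.length != 0)
            = acc.filter (fun s => s.length != 0) ++ [S] := by
          simp [List.filter_append, hne]
        have hacc' : ((acc ++ [S]).filter (fun s => s.length != 0)).Pairwise
            (fun a b => PySem.Set.equal a b = false) := by
          rw [hfacc', List.pairwise_append]
          refine ⟨hacc, by simp, ?_⟩
          intro a ha b hb
          rw [List.mem_singleton] at hb; subst hb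
          by_contra hcna
          have ha' : PySem.Set.equal a S = true := by
            cases hv : PySem.Set.equal a S with
            | false => exact absurd hv hcna
            | true => rfl
          have : acc.any (fun t => PySem.Set.equal t S) = true :=
            List.any_eq_true.mpr ⟨a, (List.mem_filter.mp ha).1, ha'⟩
          exact hmem this
        have hrec := ih (acc ++ [S]) (fun q hq => hlook q (by simp [hq])) hacc'
        rw [hrec, hfacc', List.append_assoc, List.singleton_append]
    · -- empty header set: it is filtered out on both sides
      have hsplit : ((((k, v) :: rest).map (fun kv => PySem.Set.ofList (kv.2.map Prod.fst))).filter
            (fun s => s.length != 0))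
          = ((rest.map (fun kv => PySem.Set.ofList (kv.2.map Prod.fst))).filter
            (fun s => s.length != 0)) := by
        simp only [List.map_cons, List.filter_cons, ← hS]
        rw [if_neg hne]
      rw [hsplit]
      have hcond : ((S.length != 0) && acc.any (fun t => PySem.Set.equal t S)) = false := by
        rw [Bool.eq_false_iff.mpr hne, Bool.false_and]
      rw [hcond, if_neg (by simp)]
      have hfacc' : (acc ++ [S]).filter (fun s => s.length != 0)
          = acc.filter (fun s => s.length != 0) := by
        simp [List.filter_append, Bool.eq_false_iff.mpr hne]
      have hrec := ih (acc ++ [S]) (fun q hq => hlook q (by simp [hq])) (by rwa [hfacc'])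
      rw [hrec, hfacc']

-- on a ≤-sorted list, an adjacent duplicate exists iff the list has any duplicate
theorem hasAdjDup_iff (l : List (List String)) (h : l.Pairwise (· ≤ ·)) :
    hasAdjDup l = true ↔ ¬ l.Nodup := by
  match l with
  | [] => simp [hasAdjDup]
  | [a] => simp [hasAdjDup]
  | a :: b :: t =>
    rcases List.pairwise_cons.mp h with ⟨hab, htail⟩
    by_cases he : a = b
    · subst he
      simp [hasAdjDup, List.nodup_cons]
    · have ih := hasAdjDup_iff (b :: t) htail
      have hnot : a ∉ b :: t := by
        intro hmem
        rcases List.mem_cons.mp hmem with h1 | h2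
        · exact he h1
        · have h1 : a ≤ b := hab b (by simp)
          have h2' : b ≤ a := (List.pairwise_cons.mp htail).1 a h2
          exact he (le_antisymm h1 h2')
      have : hasAdjDup (a :: b :: t) = hasAdjDup (b :: t) := by
        simp [hasAdjDup, he]
      rw [this, ih, List.nodup_cons]
      simp [hnot]

-- for nodup sets, having the same sorted element list is exactly Python's set equality
theorem sorted_eq_iff_set_equal (s t : PySem.Set String) (hs : s.Nodup) (ht : t.Nodup) :
    (PySem.List.sorted s (fun x => x) false = PySem.List.sorted t (fun x => x) false)
      ↔ PySem.Set.equal s t = true := by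
  rw [PySem.List.sorted_id_eq_sorted_id_iff_perm, PySem.Set.equal_iff,
    List.perm_ext_iff_of_nodup hs ht]

-- ===== VERDICT (by name: the statement is the Claim_ definition above) =====
theorem children_same_columns_spec : Claim_equal_children_same_columns := by
  intro data _ hpre
  unfold Spec_children_same_columns children_same_columns children_same_columns_alt
  have hlook : ∀ p ∈ data, (PySem.Dict.mk data).getD p.1 [] = p.2 := by
    intro p hp
    exact PySem.Dict.getD_of_mem_items (d := PySem.Dict.mk data) (by simpa using hp)
      (by simpa [PySem.Dict.keys] using hpre) []
  have hA := cscLoop_iff data data [] hlook (by simp)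
  simp only [List.filter_nil, List.nil_append] at hA
  set F := (data.map (fun kv => PySem.Set.ofList (kv.2.map Prod.fst))).filter
      (fun s => s.length != 0) with hF
  -- set-valued canonicalisation
  set f : PySem.Set String → List String :=
    (fun s => PySem.List.sorted s (fun x => x) false) with hf
  -- B's collected canons are exactly F.map f
  have hcanon : ∀ child : List (String × String),
      childCanon child = f (PySem.Set.ofList (child.map Prod.fst)) := by
    intro child; rw [childCanon, hf]; simp
  have hGfold : (data.map Prod.snd).foldl
      (fun acc child =>
        let keys := childCanon child
        if !keys.isEmpty then acc ++ [keys] else acc) [] = F.map f := by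
    rw [PySem.List.foldl_append_if, List.nil_append, hF, collect_canons (data.map Prod.snd)]
    simp [hf, Function.comp_def]
  rw [hGfold]
  -- every member of F is a nodup list
  have hFnodup : ∀ s ∈ F, s.Nodup := by
    intro s hsF
    rcases List.mem_map.mp (List.mem_filter.mp hsF).1 with ⟨kv, _, hkv⟩
    rw [← hkv]
    exact PySem.Set.nodup_ofList _
  -- B's result: adjacent duplicate in the sorted canons ↔ F has two set-equal members
  have hsp : (sortCanons (F.map f)).Pairwise (· ≤ ·) := by
    unfold sortCanons
    simpa using PySem.List.sorted_pairwise (F.map f) (fun x => x)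
  have hB := hasAdjDup_iff _ hsp
  have hNodupIff : (sortCanons (F.map f)).Nodup ↔
      F.Pairwise (fun a b => PySem.Set.equal a b = false) := by
    unfold sortCanons
    rw [(@PySem.List.sorted_perm _ _ List.instLinearOrder.toLT List.instLinearOrder.toDecidableLT (F.map f) (fun x => x) false).nodup_iff]
    rw [List.Nodup, List.pairwise_map]
    apply List.Pairwise.iff_of_mem
    intro a b ha hb
    rw [Ne, sorted_eq_iff_set_equal a b (hFnodup a ha) (hFnodup b hb)]
    constructor
    · intro hne
      cases hv : PySem.Set.equal a b with
      | false => rfl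
      | true => exact absurd hv hne
    · intro hfalse htrue; rw [hfalse] at htrue; exact Bool.false_ne_true htrue
  rw [Bool.eq_iff_iff, hA, hB, hNodupIff]
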